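-- pv_equiv track=rewrite | github.com/Theo-Tchilinguirian/Python-training | Structures de données (matrices, arbres, files, piles, listes chaînées, graphes), parcours et tris/Parcours de listes et tableaux + UI.py | ComptMax
-- ===== SOURCE A (Python) =====
-- def ComptMax(Liste):  # 2
--     """
--     Données:
--             Liste: une liste constitué de nombres entiers relatifs
--     Résultat:
--             Le maximum final et le nombre de fois qu'on l'a rencontré
--     """
--     Max = Liste[0]
--     Cpt = 1
--     for i in range(1, len(Liste)):
--         if Liste[i] > Max:
--             Max = Liste[i]
--             Cpt = 1  # Lorsque qu'un nouveau maximum est trouvé, le compteur se réinitialise à 1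
--         elif Liste[i] == Max:
--             Cpt += 1
--
--     return Max, Cpt
-- ===== SOURCE B (Python) =====
-- def ComptMax(Liste):
--     """Max of the list and how many times it occurs (two built-in passes)."""
--     Max = max(Liste)
--     return Max, Liste.count(Max)
-- ===== Notes on version B (the rewrite author's own statement) =====
-- stated objective: idiomatic
-- what changed: Replaces the interleaved index loop maintaining (Max, Cpt) by two separate built-in passes: max(Liste) then Liste.count(Max).
import Mathlib
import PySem

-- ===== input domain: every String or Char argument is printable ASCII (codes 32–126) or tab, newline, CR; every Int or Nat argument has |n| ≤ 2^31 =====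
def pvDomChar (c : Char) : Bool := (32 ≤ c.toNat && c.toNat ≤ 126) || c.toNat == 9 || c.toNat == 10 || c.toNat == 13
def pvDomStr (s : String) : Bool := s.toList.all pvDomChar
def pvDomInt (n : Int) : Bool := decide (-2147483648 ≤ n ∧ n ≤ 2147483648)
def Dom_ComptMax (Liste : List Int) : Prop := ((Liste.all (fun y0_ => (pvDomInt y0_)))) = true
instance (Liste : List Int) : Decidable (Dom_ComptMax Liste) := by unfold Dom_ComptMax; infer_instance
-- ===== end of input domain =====

-- B replaces A's interleaved index loop by two built-in passes: max(Liste), then Liste.count(Max).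

-- ===== PORT A =====
def ComptMax (Liste : List Int) : Int × Int :=
  let Max := PySem.List.pyGetD Liste 0 0
  (PySem.List.pyRange 1 (PySem.List.len Liste) 1).foldl
    (fun (s : Int × Int) i =>
      let x := PySem.List.pyGetD Liste i 0
      if x > s.1 then (x, 1)
      else if x = s.1 then (s.1, s.2 + 1)
      else s)
    (Max, 1)

-- ===== PORT B =====
def ComptMax_alt (Liste : List Int) : Int × Int :=
  let Max := (PySem.List.max? Liste (fun y => y)).getD 0
  (Max, (PySem.List.count Liste Max : Int))

-- ===== PRECONDITION & SPEC =====
-- A raises IndexError (B raises ValueError) on the empty list, so it is excluded.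
def Pre_ComptMax (Liste : List Int) : Prop := Liste ≠ []
instance (Liste : List Int) : Decidable (Pre_ComptMax Liste) := by unfold Pre_ComptMax; infer_instance
def pvWitness_ComptMax : List Int := [3, 1, 3]

def Spec_ComptMax (Liste : List Int) (out : Int × Int) : Prop := out = ComptMax_alt Liste
instance (Liste : List Int) (out : Int × Int) : Decidable (Spec_ComptMax Liste out) := by unfold Spec_ComptMax; infer_instance

-- ===== CLAIM (what is proved, stated in full; the proofs are below) =====
def Claim_equal_ComptMax : Prop := ∀ (Liste : List Int), Dom_ComptMax Liste → Pre_ComptMax Liste → Spec_ComptMax Liste (ComptMax Liste)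

-- ===== LEMMAS AND PROOFS =====

-- A's loop body.
def pvStep (s : Int × Int) (x : Int) : Int × Int :=
  if x > s.1 then (x, 1)
  else if x = s.1 then (s.1, s.2 + 1)
  else s

-- Invariant of A's loop: the fold returns the running maximum and the count of
-- its occurrences (seeded with c when the initial value m survives as maximum).
lemma pvLoop (xs : List Int) (m c : Int) :
    xs.foldl pvStep (m, c)
      = (xs.foldl max m, (if xs.foldl max m = m then c else 0) + (xs.count (xs.foldl max m) : Int)) := by
  induction xs generalizing m c with
  | nil => simp
  | cons x xs ih =>
    have hM := PySem.List.le_foldl_max xs (max m x)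
    simp only [List.foldl_cons]
    by_cases h1 : x > m
    · have hstep : pvStep (m, c) x = (x, 1) := by simp [pvStep, h1]
      rw [hstep, ih]
      have hmx : max m x = x := by omega
      have hxM : x ≤ xs.foldl max (max m x) := by have := hM.1; omega
      have hmM : ¬ xs.foldl max (max m x) = m := by omega
      rw [hmx] at hmM
      simp [hmx, hmM, List.count_cons]
      by_cases hx : x = xs.foldl max x
      · simp [hx.symm]; omega
      · simp [Ne.symm hx, hx]
    · by_cases h2 : x = m
      · have hstep : pvStep (m, c) x = (m, c + 1) := by simp [pvStep, h2]
        rw [hstep, ih]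
        have hmx : max m x = m := by omega
        simp only [hmx, List.count_cons]
        by_cases hm : xs.foldl max m = m
        · simp [hm, h2]; omega
        · have : ¬ x = xs.foldl max m := by rw [h2]; exact fun h => hm h.symm
          simp [hm, this]
      · have hstep : pvStep (m, c) x = (m, c) := by simp [pvStep, h1, h2]
        rw [hstep, ih]
        have hmx : max m x = m := by omega
        have hxm : x < m := by omega
        have hxM : ¬ x = xs.foldl max m := by
          have := (PySem.List.le_foldl_max xs m).1; omega
        simp [hmx, hxM]

-- ===== VERDICT (by name: the statement is the Claim_ definition above) =====
theorem ComptMax_spec : Claim_equal_ComptMax := by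
  intro Liste _ hpre
  unfold Spec_ComptMax ComptMax ComptMax_alt
  match Liste with
  | [] => exact absurd rfl hpre
  | x :: xs =>
    have hfold := PySem.List.foldl_pyRange_pyGetD (xs := x :: xs) (a := 1)
      (f := pvStep) (d := 0) (init := (PySem.List.pyGetD (x :: xs) 0 0, 1)) (by norm_num)
    simp only [pvStep] at hfold
    rw [hfold]
    have h0 : PySem.List.pyGetD (x :: xs) 0 0 = x := by
      simp [PySem.List.pyGetD, PySem.List.pyGet?, PySem.List.pyIdx?]
    simp only [h0]
    rw [pvLoop, PySem.List.max?_id_cons]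
    simp [PySem.List.count, List.count_cons]
    by_cases hm : xs.foldl max x = x
    · simp [hm]; omega
    · have : ¬ x = xs.foldl max x := fun h => hm h.symm
      simp [hm, this]
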